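-- pv_equiv track=rewrite | github.com/vaikunth-e/hardware-design-for-machine-learning | lab3/systolic_model.py | systolic_model
-- ===== SOURCE A (Python) =====
-- def systolic_model(inputs, weights, y_prev=0, flush_cycles=4):
--     N = len(weights)
--
--     x_reg = [0] * N   # slice x_out registers
--     y_reg = [0] * N   # slice y_out registers
--
--     results = []
--     first_cycle = True
--
--     total_cycles = len(inputs) + flush_cycles
--
--     for t in range(total_cycles):
--         # apply input or zero during flush
--         x_in_ext = inputs[t] if t < len(inputs) else 0
--
--         # construct buses from old state
--         x_bus = x_reg + [x_in_ext]
--         y_bus = ([y_prev] if first_cycle else [0]) + y_reg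
--
--         # compute next registered values
--         next_x = [0] * N
--         next_y = [0] * N
--
--         for i in range(N):
--             next_x[i] = x_bus[i + 1]
--             next_y[i] = y_bus[i] + weights[i] * x_reg[i]
--
--         # update  registers
--         x_reg = next_x
--         y_reg = next_y
--         first_cycle = False
--
--         # output from final slice
--         results.append(y_reg[N - 1])
--
--     return results
-- ===== SOURCE B (Python) =====
-- def systolic_model(inputs, weights, y_prev=0, flush_cycles=4):
--     # Closed-form: output at cycle t is the systolic convolution tap sum, no register simulation.
--     N = len(weights)
--     L = len(inputs)
--     results = []
--     for t in range(L + flush_cycles):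
--         acc = y_prev if t == N - 1 else 0
--         k = t - 2 * N + 1
--         for w in weights:
--             if 0 <= k < L:
--                 acc = acc + w * inputs[k]
--             k += 2
--         results.append(acc)
--     return results
-- ===== Notes on version B (the rewrite author's own statement) =====
-- stated objective: faster
-- what changed: Replaced the cycle-by-cycle x/y shift-register simulation with a direct closed-form tap sum: each output t is (y_prev if t==N-1 else 0) plus sum over weights of w[p]*inputs[t-2N+1+2p], skipping out-of-range taps.
-- outside the precondition, e.g. on systolic_model([1], [], 0, 1): A raises IndexError, B returns [0, 0]
import Mathlib
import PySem

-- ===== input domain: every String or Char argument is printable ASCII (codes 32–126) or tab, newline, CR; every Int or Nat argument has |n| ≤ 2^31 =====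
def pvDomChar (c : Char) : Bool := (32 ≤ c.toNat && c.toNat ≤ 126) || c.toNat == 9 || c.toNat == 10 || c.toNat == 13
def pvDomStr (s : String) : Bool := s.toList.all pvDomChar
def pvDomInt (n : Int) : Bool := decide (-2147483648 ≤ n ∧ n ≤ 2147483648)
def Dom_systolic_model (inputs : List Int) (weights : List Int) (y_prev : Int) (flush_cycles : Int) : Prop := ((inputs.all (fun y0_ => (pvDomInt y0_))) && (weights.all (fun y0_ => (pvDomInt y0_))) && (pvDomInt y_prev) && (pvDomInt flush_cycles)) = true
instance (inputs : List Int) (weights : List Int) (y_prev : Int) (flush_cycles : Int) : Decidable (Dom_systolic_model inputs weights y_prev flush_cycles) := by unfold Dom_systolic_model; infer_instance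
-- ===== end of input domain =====

-- B replaces A's cycle-by-cycle shift-register simulation with a direct closed-form tap sum (no per-cycle register lists; measured constant-factor speedup).


-- ===== PORT A =====
-- one simulation cycle of A's loop body (state: x_reg, y_reg, first_cycle, results)
def systolic_step (inputs : List Int) (weights : List Int) (y_prev : Int)
    (st : List Int × List Int × Bool × List Int) (t : Nat) : List Int × List Int × Bool × List Int :=
  let N := weights.length
  let x_reg := st.1
  let y_reg := st.2.1
  let first_cycle := st.2.2.1
  let results := st.2.2.2
  let x_in_ext := if t < inputs.length then inputs.getD t 0 else 0
  let x_bus := x_reg ++ [x_in_ext]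
  let y_bus := (if first_cycle then [y_prev] else [0]) ++ y_reg
  let next_x := (List.range N).map (fun i => x_bus.getD (i + 1) 0)
  let next_y := (List.range N).map (fun i => y_bus.getD i 0 + weights.getD i 0 * x_reg.getD i 0)
  (next_x, next_y, false, results ++ [next_y.getD (N - 1) 0])

def systolic_model (inputs : List Int) (weights : List Int) (y_prev : Int) (flush_cycles : Int) : List Int :=
  ((List.range ((inputs.length : Int) + flush_cycles).toNat).foldl (systolic_step inputs weights y_prev)
    (List.replicate weights.length 0, List.replicate weights.length 0, true, [])).2.2.2

-- ===== PORT B =====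
def systolic_model_alt (inputs : List Int) (weights : List Int) (y_prev : Int) (flush_cycles : Int) : List Int :=
  (List.range ((inputs.length : Int) + flush_cycles).toNat).map (fun (t : Nat) =>
    (weights.foldl
      (fun (st : Int × Int) w =>
        (if 0 ≤ st.2 ∧ st.2 < (inputs.length : Int) then st.1 + w * inputs.getD st.2.toNat 0 else st.1,
         st.2 + 2))
      ((if (t : Int) = (weights.length : Int) - 1 then y_prev else 0),
       (t : Int) - 2 * weights.length + 1)).1)

-- ===== PRECONDITION & SPEC =====
-- Pre_ excludes weights = [] with a positive cycle count: there Python A raises IndexError (y_reg[-1] on []).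
def Pre_systolic_model (inputs : List Int) (weights : List Int) (y_prev : Int) (flush_cycles : Int) : Prop :=
  weights ≠ [] ∨ (inputs.length : Int) + flush_cycles ≤ 0
instance (inputs : List Int) (weights : List Int) (y_prev : Int) (flush_cycles : Int) : Decidable (Pre_systolic_model inputs weights y_prev flush_cycles) := by unfold Pre_systolic_model; infer_instance
def pvWitness_systolic_model : List Int × List Int × Int × Int := ([1, 2, 3], [4, 5], 7, 4)

def Spec_systolic_model (inputs : List Int) (weights : List Int) (y_prev : Int) (flush_cycles : Int) (out : List Int) : Prop := out = systolic_model_alt inputs weights y_prev flush_cycles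
instance (inputs : List Int) (weights : List Int) (y_prev : Int) (flush_cycles : Int) (out : List Int) : Decidable (Spec_systolic_model inputs weights y_prev flush_cycles out) := by unfold Spec_systolic_model; infer_instance

-- ===== CLAIM (what is proved, stated in full; the proofs are below) =====
def Claim_equal_systolic_model : Prop := ∀ (inputs : List Int) (weights : List Int) (y_prev : Int) (flush_cycles : Int), Dom_systolic_model inputs weights y_prev flush_cycles → Pre_systolic_model inputs weights y_prev flush_cycles → Spec_systolic_model inputs weights y_prev flush_cycles (systolic_model inputs weights y_prev flush_cycles)

-- ===== LEMMAS AND PROOFS =====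

-- inputs[k] if 0 <= k < len(inputs) else 0 (the tap value B's loop reads)
def input_at (inputs : List Int) (k : Int) : Int :=
  if 0 ≤ k ∧ k < inputs.length then inputs.getD k.toNat 0 else 0

-- closed-form register contents after c cycles
def xSpec (inputs : List Int) (N : Nat) (c : Nat) (i : Nat) : Int :=
  input_at inputs ((c : Int) - N + i)

def ySpec (inputs : List Int) (weights : List Int) (y_prev : Int) (N : Nat) (c : Nat) (i : Nat) : Int :=
  (if (c : Int) - 1 = (i : Int) then y_prev else 0) +
    ∑ j ∈ Finset.range (i + 1), weights.getD j 0 * input_at inputs ((c : Int) - 1 - i - N + 2 * j)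

theorem input_at_neg (inputs : List Int) (k : Int) (h : k < 0) : input_at inputs k = 0 := by
  simp [input_at]; omega

-- B's inner tap loop (fold over weights with stepping index k) computes the tap sum
theorem foldl_tap (inputs : List Int) (ws : List Int) (acc k0 : Int) :
    (ws.foldl
      (fun (st : Int × Int) w =>
        (if 0 ≤ st.2 ∧ st.2 < (inputs.length : Int) then st.1 + w * inputs.getD st.2.toNat 0 else st.1,
         st.2 + 2)) (acc, k0)).1 =
    acc + ∑ p ∈ Finset.range ws.length, ws.getD p 0 * input_at inputs (k0 + 2 * p) := by
  induction ws generalizing acc k0 with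
  | nil => simp
  | cons w ws ih =>
    rw [List.foldl_cons, ih]
    have hstep : (if 0 ≤ k0 ∧ k0 < (inputs.length : Int) then acc + w * inputs.getD k0.toNat 0 else acc) =
        acc + w * input_at inputs k0 := by
      simp only [input_at]
      by_cases hk : 0 ≤ k0 ∧ k0 < (inputs.length : Int)
      · rw [if_pos hk, if_pos hk]
      · rw [if_neg hk, if_neg hk]
        ring
    rw [hstep, List.length_cons, Finset.sum_range_succ']
    simp only [List.getD_cons_succ, List.getD_cons_zero]
    have hsum : ∑ p ∈ Finset.range ws.length, ws.getD p 0 * input_at inputs (k0 + 2 + 2 * p) =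
        ∑ p ∈ Finset.range ws.length, ws.getD p 0 * input_at inputs (k0 + 2 * (p + 1)) := by
      apply Finset.sum_congr rfl
      intro p _
      congr 2
      push_cast; ring
    rw [hsum]
    push_cast
    ring

theorem getD_map_range {f : Nat → Int} {N i : Nat} (h : i < N) :
    ((List.range N).map f).getD i 0 = f i := by
  rw [List.getD_eq_getElem?_getD]
  simp [List.getElem?_map, List.getElem?_range, h]

-- one y-register update step matches the closed form
theorem hy_step_lemma (inputs : List Int) (weights : List Int) (y_prev : Int) (c : Nat)
    (i : Nat) (hiN : i < weights.length) :
    ((if (c == 0) = true then [y_prev] else [0]) ++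
      (List.range weights.length).map (ySpec inputs weights y_prev weights.length c)).getD i 0 +
      weights.getD i 0 * xSpec inputs weights.length c i =
    ySpec inputs weights y_prev weights.length (c + 1) i := by
  set N := weights.length with hN
  by_cases hi0 : i = 0
  · subst hi0
    have hhead : ((if (c == 0) = true then [y_prev] else [0]) ++
        (List.range N).map (ySpec inputs weights y_prev N c)).getD 0 0 =
        (if c = 0 then y_prev else 0) := by
      by_cases hc : c = 0 <;> simp [hc]
    rw [hhead]
    simp only [ySpec, xSpec]
    rw [Finset.sum_range_one]
    push_cast
    by_cases hc : c = 0
    · rw [if_pos hc, if_pos (by omega)]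
      ring_nf
    · rw [if_neg hc, if_neg (by omega)]
      ring_nf
  · obtain ⟨i', rfl⟩ : ∃ i', i = i' + 1 := ⟨i - 1, by omega⟩
    have hi' : i' < N := by omega
    have hlen : ∀ (z : Int), ([z] ++ (List.range N).map (ySpec inputs weights y_prev N c)).getD (i' + 1) 0 = ySpec inputs weights y_prev N c i' := by
      intro z
      rw [List.getD_eq_getElem?_getD]
      simp [hi']
    have htail : ((if (c == 0) = true then [y_prev] else [0]) ++
        (List.range N).map (ySpec inputs weights y_prev N c)).getD (i' + 1) 0 =
        ySpec inputs weights y_prev N c i' := by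
      by_cases hc : c = 0
      · subst hc
        simpa using hlen y_prev
      · have hb : (c == 0) = false := by simpa using hc
        rw [hb]
        simpa using hlen 0
    rw [htail]
    simp only [ySpec, xSpec, Finset.sum_range_succ]
    push_cast
    by_cases hc : (c : Int) - 1 = (i' : Int)
    · rw [if_pos hc, if_pos (by omega)]
      ring_nf
    · rw [if_neg hc, if_neg (by omega)]
      ring_nf

-- the loop invariant: after c cycles the state is the closed-form register contents
theorem invariant (inputs : List Int) (weights : List Int) (y_prev : Int) (c : Nat) :
    (List.range c).foldl (systolic_step inputs weights y_prev)
      (List.replicate weights.length 0, List.replicate weights.length 0, true, []) =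
    ((List.range weights.length).map (xSpec inputs weights.length c),
     (List.range weights.length).map (ySpec inputs weights y_prev weights.length c),
     (c == 0),
     (List.range c).map (fun (t : Nat) =>
        (if (t : Int) = (weights.length : Int) - 1 then y_prev else 0) +
          ∑ p ∈ Finset.range weights.length,
            weights.getD p 0 * input_at inputs ((t : Int) - 2 * weights.length + 1 + 2 * p))) := by
  set N := weights.length with hN
  induction c with
  | zero =>
    simp only [List.range_zero, List.foldl_nil, List.map_nil]
    refine congrArg₂ _ ?_ (congrArg₂ _ ?_ rfl)
    · symm; rw [List.eq_replicate_iff]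
      constructor
      · simp
      · intro b hb
        simp only [List.mem_map, List.mem_range] at hb
        obtain ⟨i, hi, rfl⟩ := hb
        apply input_at_neg; omega
    · symm; rw [List.eq_replicate_iff]
      constructor
      · simp
      · intro b hb
        simp only [List.mem_map, List.mem_range] at hb
        obtain ⟨i, hi, rfl⟩ := hb
        simp only [ySpec, Nat.cast_zero]
        rw [if_neg (by omega)]
        have h2 : ∀ j ∈ Finset.range (i + 1),
            weights.getD j 0 * input_at inputs ((0 : Int) - 1 - i - N + 2 * j) = 0 := by
          intro j hj
          simp only [Finset.mem_range] at hj
          rw [input_at_neg]; · ring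
          · omega
        rw [Finset.sum_congr rfl h2]
        simp
  | succ c ih =>
    rw [List.range_succ, List.foldl_append, List.foldl_cons, List.foldl_nil, ih]
    simp only [systolic_step]
    refine congrArg₂ _ ?_ (congrArg₂ _ ?_ (congrArg₂ _ ?_ ?_))
    · -- x registers
      apply List.ext_getElem
      · simp [hN]
      · intro i h1 h2
        simp only [List.getElem_map, List.getElem_range] at *
        have hiN : i < N := by simpa [hN] using h2
        by_cases hlast : i + 1 = N
        · have hg : ((List.range N).map (xSpec inputs N c) ++
              [if c < inputs.length then inputs.getD c 0 else 0]).getD (i + 1) 0 =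
              (if c < inputs.length then inputs.getD c 0 else 0) := by
            rw [List.getD_eq_getElem?_getD, List.getElem?_append_right (by simp [hlast])]
            simp [hlast]
          rw [hg]
          simp only [xSpec, input_at]
          push_cast
          have e : (c : Int) + 1 - N + i = (c : Int) := by omega
          rw [e]
          by_cases hc : c < inputs.length
          · rw [if_pos hc, if_pos (by constructor <;> omega)]
            simp
          · rw [if_neg hc, if_neg (by omega)]
        · have hi1 : i + 1 < N := by omega
          have hg : ((List.range N).map (xSpec inputs N c) ++
              [if c < inputs.length then inputs.getD c 0 else 0]).getD (i + 1) 0 =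
              xSpec inputs N c (i + 1) := by
            rw [List.getD_eq_getElem?_getD, List.getElem?_append_left (by simpa using hi1)]
            simp [hi1]
          rw [hg]
          simp only [xSpec]
          congr 1
          push_cast; ring
    · -- y registers
      have hy : ∀ i, i < N →
          ((if (c == 0) = true then [y_prev] else [0]) ++
            (List.range N).map (ySpec inputs weights y_prev N c)).getD i 0 +
            weights.getD i 0 * xSpec inputs N c i =
          ySpec inputs weights y_prev N (c + 1) i :=
        fun i hi => hy_step_lemma inputs weights y_prev c i (by omega)
      apply List.ext_getElem
      · simp [hN]
      · intro i h1 h2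
        simp only [List.getElem_map, List.getElem_range] at *
        have hiN : i < N := by simpa [hN] using h2
        have hxi : ((List.range N).map (xSpec inputs N c)).getD i 0 = xSpec inputs N c i :=
          getD_map_range hiN
        rw [hxi]
        exact hy i hiN
    · simp
    · -- results
      rw [List.map_append]
      congr 1
      simp only [List.map_cons, List.map_nil]
      congr 1
      by_cases hN0 : N = 0
      · have hw : weights.length = 0 := by omega
        simp [hw, hN0]
      · have hN1 : N - 1 < N := by omega
        have hw1 : weights.length - 1 < weights.length := by omega
        rw [show (List.map (fun i =>
              ((if (c == 0) = true then [y_prev] else [0]) ++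
                List.map (ySpec inputs weights y_prev N c) (List.range N)).getD i 0 +
              weights.getD i 0 * (List.map (xSpec inputs N c) (List.range N)).getD i 0)
              (List.range weights.length)).getD (weights.length - 1) 0 =
            ((if (c == 0) = true then [y_prev] else [0]) ++
              List.map (ySpec inputs weights y_prev N c) (List.range N)).getD (weights.length - 1) 0 +
              weights.getD (weights.length - 1) 0 *
                (List.map (xSpec inputs N c) (List.range N)).getD (weights.length - 1) 0
            from getD_map_range hw1]
        rw [getD_map_range (show weights.length - 1 < N by omega)]
        rw [hy_step_lemma inputs weights y_prev c (weights.length - 1) (by omega)]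
        simp only [ySpec]
        have hrange : weights.length - 1 + 1 = N := by omega
        rw [hrange]
        have hNc : (↑(weights.length - 1) : Int) = (N : Int) - 1 := by omega
        rw [hNc]
        push_cast
        by_cases hc : (c : Int) = (N : Int) - 1
        · rw [if_pos (by omega), if_pos hc]
          simp only [← hN]
          ring_nf
        · rw [if_neg (by omega), if_neg hc]
          simp only [← hN]
          ring_nf

-- ===== VERDICT (by name: the statement is the Claim_ definition above) =====
theorem systolic_model_spec : Claim_equal_systolic_model := by
  intro inputs weights y_prev flush_cycles _ _
  unfold Spec_systolic_model systolic_model systolic_model_alt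
  rw [invariant]
  apply List.map_congr_left
  intro t _
  rw [foldl_tap]
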